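-- pv_equiv track=rewrite | github.com/BalajiGurusala/coding | DSA/Sorting/Find_Intersection/find_intersection.py | find_intersectio_dict
-- ===== SOURCE A (Python) =====
-- def find_intersectio_dict(arr1, arr2, arr3):
--     """
--     Args:
--      arr1(list_int32)
--      arr2(list_int32)
--      arr3(list_int32)
--     Returns:
--      list_int32
--     """
--     # Write your code here.
--     dict2 = {}
--     dict3 = {}
--     result = []
--
--     for num in arr2:
--         dict2[num] = dict2.get(num,0)+1
--     for num in arr3:
--         dict3[num] = dict3.get(num,0)+1
--
--     for key in arr1:
--         if key in dict2 and key in dict3: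
--             if dict2[key] > 0 and dict3[key] > 0:
--                 result.append(key)
--                 dict2[key] -= 1
--                 dict3[key] -= 1
--     if len(result):
--         return result
--     else:
--         return [-1]
-- ===== SOURCE B (Python) =====
-- def find_intersectio_dict(arr1, arr2, arr3):
--     # Stateless positional test: the k-th occurrence of x in arr1 belongs to the
--     # intersection iff k <= min(multiplicity of x in arr2, in arr3); no counters
--     # are built or decremented.
--     result = [x for i, x in enumerate(arr1)
--               if arr1[:i + 1].count(x) <= min(arr2.count(x), arr3.count(x))]
--     return result if result else [-1]
-- ===== Notes on version B (the rewrite author's own statement) =====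
-- stated objective: simpler
-- what changed: B drops all dictionaries and mutable state: it keeps each element arr1[i] iff its occurrence rank in the prefix arr1[:i+1] is at most min(count in arr2, count in arr3), a one-line stateless comprehension instead of building and decrementing counters.
import Mathlib
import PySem

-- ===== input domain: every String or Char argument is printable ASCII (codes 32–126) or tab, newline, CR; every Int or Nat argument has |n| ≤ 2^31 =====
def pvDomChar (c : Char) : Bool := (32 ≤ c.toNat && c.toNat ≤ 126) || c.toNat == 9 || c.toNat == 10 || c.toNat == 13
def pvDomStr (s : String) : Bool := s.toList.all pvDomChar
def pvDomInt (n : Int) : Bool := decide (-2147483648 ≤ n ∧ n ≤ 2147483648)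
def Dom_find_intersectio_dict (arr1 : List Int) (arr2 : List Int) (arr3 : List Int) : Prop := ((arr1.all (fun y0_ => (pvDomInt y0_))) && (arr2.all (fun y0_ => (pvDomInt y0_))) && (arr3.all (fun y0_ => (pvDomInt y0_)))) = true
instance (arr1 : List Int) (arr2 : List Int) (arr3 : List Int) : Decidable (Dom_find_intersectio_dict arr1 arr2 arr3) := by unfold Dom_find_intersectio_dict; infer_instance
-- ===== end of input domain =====

-- B replaces A's two decremented dicts by a stateless per-position rank test
-- (keep arr1[i] iff its occurrence rank in arr1[:i+1] is at most the min of its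
-- multiplicities in arr2/arr3): simpler, no mutable state.

-- ===== PORT A =====
-- dict2[key] / dict3[key] inside the branch are guarded by 'key in dict2/dict3',
-- so the lookup is ported as getD (equal to the stored value when present).
def find_intersectio_dict (arr1 : List Int) (arr2 : List Int) (arr3 : List Int) : List Int :=
  let dict2 := arr2.foldl (fun d num => d.insert num (d.getD num 0 + 1)) (PySem.Dict.empty)
  let dict3 := arr3.foldl (fun d num => d.insert num (d.getD num 0 + 1)) (PySem.Dict.empty)
  let st := arr1.foldl
    (fun (st : PySem.Dict Int Int × PySem.Dict Int Int × List Int) key =>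
      if st.1.contains key = true ∧ st.2.1.contains key = true then
        if st.1.getD key 0 > 0 ∧ st.2.1.getD key 0 > 0 then
          (st.1.insert key (st.1.getD key 0 - 1),
           st.2.1.insert key (st.2.1.getD key 0 - 1),
           st.2.2 ++ [key])
        else st
      else st)
    (dict2, dict3, ([] : List Int))
  if st.2.2.length ≠ 0 then st.2.2 else [-1]

-- ===== PORT B =====
-- The comprehension 'x for i, x in enumerate(arr1) if arr1[:i+1].count(x) <= min(...)'
-- is ported as filterMap over PySem.List.enumerate; arr1[:i+1] is PySem.List.slice.
def find_intersectio_dict_alt (arr1 : List Int) (arr2 : List Int) (arr3 : List Int) : List Int :=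
  let result := (PySem.List.enumerate arr1 0).filterMap
    (fun p =>
      if (PySem.List.slice arr1 none (some (p.1 + 1))).count p.2 ≤
          min (arr2.count p.2) (arr3.count p.2) then some p.2 else none)
  if result ≠ [] then result else [-1]

-- ===== PRECONDITION & SPEC =====
def Spec_find_intersectio_dict (arr1 : List Int) (arr2 : List Int) (arr3 : List Int) (out : List Int) : Prop := out = find_intersectio_dict_alt arr1 arr2 arr3
instance (arr1 : List Int) (arr2 : List Int) (arr3 : List Int) (out : List Int) : Decidable (Spec_find_intersectio_dict arr1 arr2 arr3 out) := by unfold Spec_find_intersectio_dict; infer_instance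

-- ===== CLAIM =====
def Claim_equal_find_intersectio_dict : Prop := ∀ (arr1 : List Int) (arr2 : List Int) (arr3 : List Int), Dom_find_intersectio_dict arr1 arr2 arr3 → Spec_find_intersectio_dict arr1 arr2 arr3 (find_intersectio_dict arr1 arr2 arr3)

-- ===== LEMMAS AND PROOFS =====

-- Common recursive description of the emitted list: process the suffix l, with
-- the already-processed prefix p of arr1; emit x iff its rank in p ++ [x] is
-- within min of the arr2/arr3 multiplicities.
def pvEmit (arr2 arr3 : List Int) : List Int → List Int → List Int
  | [], _ => []
  | x :: l, p =>
      if p.count x + 1 ≤ min (arr2.count x) (arr3.count x)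
      then x :: pvEmit arr2 arr3 l (p ++ [x])
      else pvEmit arr2 arr3 l (p ++ [x])

-- getD > 0 forces presence (an absent key reads as the default 0).
lemma getD_pos_contains (d : PySem.Dict Int Int) (k : Int) (h : 0 < d.getD k 0) :
    d.contains k = true := by
  by_cases hc : d.contains k = true
  · exact hc
  · rw [PySem.Dict.getD_of_not_contains d 0 (by simpa using hc)] at h
    omega

-- A's emit fold equals pvEmit: the dict entries always read
-- count - min(prefix count, min of the two counts).
lemma emitA_eq_pvEmit (arr2 arr3 : List Int) (l p : List Int)
    (d2 d3 : PySem.Dict Int Int) (res : List Int)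
    (h2 : ∀ k, d2.getD k 0 =
      (arr2.count k : Int) - min ((p.count k : Int)) (min (arr2.count k) (arr3.count k) : Int))
    (h3 : ∀ k, d3.getD k 0 =
      (arr3.count k : Int) - min ((p.count k : Int)) (min (arr2.count k) (arr3.count k) : Int)) :
    (l.foldl
      (fun (st : PySem.Dict Int Int × PySem.Dict Int Int × List Int) key =>
        if st.1.contains key = true ∧ st.2.1.contains key = true then
          if st.1.getD key 0 > 0 ∧ st.2.1.getD key 0 > 0 then
            (st.1.insert key (st.1.getD key 0 - 1),
             st.2.1.insert key (st.2.1.getD key 0 - 1),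
             st.2.2 ++ [key])
          else st
        else st)
      (d2, d3, res)).2.2
    = res ++ pvEmit arr2 arr3 l p := by
  induction l generalizing p d2 d3 res with
  | nil => simp [pvEmit]
  | cons x l ih =>
    simp only [List.foldl_cons, pvEmit]
    have hM : (0 : Int) ≤ min ((arr2.count x : Int)) ((arr3.count x : Int)) := by positivity
    by_cases hcond : p.count x + 1 ≤ min (arr2.count x) (arr3.count x)
    · -- emit: prefix count is strictly below the min, so both dict entries are > 0
      have hlt : ((p.count x : Int)) < min ((arr2.count x : Int)) ((arr3.count x : Int)) := by
        have := hcond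
        omega
      have hd2 : 0 < d2.getD x 0 := by rw [h2 x]; omega
      have hd3 : 0 < d3.getD x 0 := by rw [h3 x]; omega
      rw [if_pos ⟨getD_pos_contains d2 x hd2, getD_pos_contains d3 x hd3⟩,
          if_pos ⟨hd2, hd3⟩, if_pos hcond]
      rw [ih (p ++ [x]) _ _ _ ?_ ?_]
      · simp
      · intro k
        rw [PySem.Dict.getD_insert]
        by_cases hk : k = x
        · subst hk
          rw [if_pos rfl, h2 k]
          have : (p ++ [k]).count k = p.count k + 1 := by simp
          rw [this]
          push_cast
          omega
        · rw [if_neg hk, h2 k]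
          have : (p ++ [x]).count k = p.count k := by simp [List.count_append, Ne.symm hk]
          rw [this]
      · intro k
        rw [PySem.Dict.getD_insert]
        by_cases hk : k = x
        · subst hk
          rw [if_pos rfl, h3 k]
          have : (p ++ [k]).count k = p.count k + 1 := by simp
          rw [this]
          push_cast
          omega
        · rw [if_neg hk, h3 k]
          have : (p ++ [x]).count k = p.count k := by simp [List.count_append, Ne.symm hk]
          rw [this]
    · -- no emit: prefix count already reached the min, both branches leave the state
      have hge : min ((arr2.count x : Int)) ((arr3.count x : Int)) ≤ ((p.count x : Int)) := by
        have := hcond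
        push_cast at this ⊢
        omega
      have hA : ¬ (d2.getD x 0 > 0 ∧ d3.getD x 0 > 0) := by
        rw [h2 x, h3 x]
        rintro ⟨u, v⟩
        omega
      have hstep : ∀ (st : PySem.Dict Int Int × PySem.Dict Int Int × List Int),
          st = (d2, d3, res) →
          (if st.1.contains x = true ∧ st.2.1.contains x = true then
            if st.1.getD x 0 > 0 ∧ st.2.1.getD x 0 > 0 then
              (st.1.insert x (st.1.getD x 0 - 1),
               st.2.1.insert x (st.2.1.getD x 0 - 1),
               st.2.2 ++ [x])
            else st
          else st) = (d2, d3, res) := by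
        rintro st rfl
        by_cases hc : d2.contains x = true ∧ d3.contains x = true
        · simp only [if_pos hc, if_neg hA]
        · simp only [if_neg hc]
      rw [hstep _ rfl, if_neg hcond]
      apply ih (p ++ [x]) _ _ _ ?_ ?_
      · intro k
        rw [h2 k]
        by_cases hk : k = x
        · subst hk
          have : (p ++ [k]).count k = p.count k + 1 := by simp
          rw [this]
          push_cast
          omega
        · have : (p ++ [x]).count k = p.count k := by simp [List.count_append, Ne.symm hk]
          rw [this]
      · intro k
        rw [h3 k]
        by_cases hk : k = x
        · subst hk
          have : (p ++ [k]).count k = p.count k + 1 := by simp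
          rw [this]
          push_cast
          omega
        · have : (p ++ [x]).count k = p.count k := by simp [List.count_append, Ne.symm hk]
          rw [this]

-- B's filterMap over enumerate equals pvEmit, tracking the processed prefix.
lemma emitB_eq_pvEmit (arr1 arr2 arr3 : List Int) (l p : List Int) (harr : arr1 = p ++ l) :
    (PySem.List.enumerate l ((p.length : Int))).filterMap
      (fun q =>
        if (PySem.List.slice arr1 none (some (q.1 + 1))).count q.2 ≤
            min (arr2.count q.2) (arr3.count q.2) then some q.2 else none)
    = pvEmit arr2 arr3 l p := by
  induction l generalizing p with
  | nil => simp [PySem.List.enumerate_nil, pvEmit]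
  | cons x l ih =>
    rw [PySem.List.enumerate_cons]
    have hslice : PySem.List.slice arr1 none (some ((p.length : Int) + 1)) = p ++ [x] := by
      have : ((p.length : Int) + 1) = (((p.length + 1 : Nat)) : Int) := by push_cast; ring
      rw [this, PySem.List.slice_to_natCast, harr, List.take_append]
      simp
    have hcount : (p ++ [x]).count x = p.count x + 1 := by simp
    simp only [List.filterMap_cons, pvEmit]
    by_cases hcond : p.count x + 1 ≤ min (arr2.count x) (arr3.count x)
    · rw [if_pos (by rw [hslice, hcount]; exact hcond), if_pos hcond]
      have := ih (p ++ [x]) (by simp [harr])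
      simp only [List.length_append, List.length_cons, List.length_nil] at this
      push_cast at this ⊢
      simp only [this]
    · rw [if_neg (by rw [hslice, hcount]; exact hcond), if_neg hcond]
      have := ih (p ++ [x]) (by simp [harr])
      simp only [List.length_append, List.length_cons, List.length_nil] at this
      push_cast at this ⊢
      simp only [this]

-- the two final guards agree: a list has nonzero length iff it is nonempty.
lemma final_if (r : List Int) :
    (if r.length ≠ 0 then r else [-1]) = (if r ≠ [] then r else [-1]) := by
  cases r <;> simp

-- ===== VERDICT =====
theorem find_intersectio_dict_spec : Claim_equal_find_intersectio_dict := by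
  intro arr1 arr2 arr3 _
  unfold Spec_find_intersectio_dict find_intersectio_dict find_intersectio_dict_alt
  simp only []
  have hinit : ∀ (l : List Int) (k : Int),
      (l.foldl (fun (d : PySem.Dict Int Int) num => d.insert num (d.getD num 0 + 1)) PySem.Dict.empty).getD k 0
      = (l.count k : Int) := by
    intro l k
    rw [PySem.Dict.getD_foldl_insert_add_one]
    simp
  rw [emitA_eq_pvEmit arr2 arr3 arr1 []
        _ _ []
        (by intro k; rw [hinit arr2 k]; simp)
        (by intro k; rw [hinit arr3 k]; simp)]
  rw [show ((0 : Int) = ((([] : List Int).length : Int))) by simp] at *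
  rw [emitB_eq_pvEmit arr1 arr2 arr3 arr1 [] (by simp)]
  simp only [List.nil_append]
  exact final_if _
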